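-- pv_equiv track=rewrite | github.com/apdimier/Etumos | Python/docmodelbuilder.py | expectedOutputsAnalysis
-- ===== SOURCE A (Python) =====
-- def expectedOutputsAnalysis(table):
--     """
--     we analyse the table linked to the expected outputs
--     """
--     expectedOutputs = []
--     debAnalyse =  table.index("Expected output names:")
--     if len(table[debAnalyse:]) >=2:
--         ind = debAnalyse+2
--         while ind+2<=len(table):
--             expectedOutputs.append([table[ind], table[ind+1]])
--             ind+=2
--
--     return expectedOutputs
-- ===== SOURCE B (Python) =====
-- def expectedOutputsAnalysis(table):
--     """
--     we analyse the table linked to the expected outputs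
--     """
--     tail = table[table.index("Expected output names:") + 2:]
--
--     def pairs(xs):
--         if len(xs) < 2:
--             return []
--         return [[xs[0], xs[1]]] + pairs(xs[2:])
--
--     return pairs(tail)
-- ===== Notes on version B (the rewrite author's own statement) =====
-- stated objective: simpler
-- what changed: Replaces the index-advancing while loop with its redundant length guard by a single slice of the tail after the marker plus a small structural recursion that pairs consecutive elements.
import Mathlib
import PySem

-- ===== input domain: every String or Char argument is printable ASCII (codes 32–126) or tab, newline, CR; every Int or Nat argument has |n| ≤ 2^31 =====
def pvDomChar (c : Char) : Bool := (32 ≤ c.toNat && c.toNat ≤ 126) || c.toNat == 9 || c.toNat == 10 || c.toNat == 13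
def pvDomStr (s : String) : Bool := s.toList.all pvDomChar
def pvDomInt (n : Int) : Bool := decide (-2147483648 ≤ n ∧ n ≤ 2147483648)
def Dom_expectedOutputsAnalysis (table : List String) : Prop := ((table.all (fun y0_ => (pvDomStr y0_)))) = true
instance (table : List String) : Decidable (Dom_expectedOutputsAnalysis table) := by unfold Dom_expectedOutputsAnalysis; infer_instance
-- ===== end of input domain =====

-- B replaces A's index-advancing while loop (and its redundant length guard) by one slice of the
-- tail after the marker plus a structural recursion pairing consecutive elements (objective: simpler).

-- ===== PORT A =====
-- the while loop: while ind+2 <= len(table): expectedOutputs.append([table[ind], table[ind+1]]); ind += 2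
def pvALoop (table : List String) (ind : Nat) (acc : List (List String)) : List (List String) :=
  if ind + 2 ≤ table.length then
    pvALoop table (ind + 2) (acc ++ [[table.getD ind "", table.getD (ind + 1) ""]])
  else acc
termination_by table.length - ind
decreasing_by omega

def expectedOutputsAnalysis (table : List String) : List (List String) :=
  match PySem.List.index? table "Expected output names:" with
  | none => []   -- table.index raises ValueError here; excluded by Pre_
  | some deb =>
    if 2 ≤ (PySem.List.slice table (some (deb : Int)) none).length then
      pvALoop table (deb + 2) []
    else []

-- ===== PORT B =====
-- pairs(xs): if len(xs) < 2: return []  else [[xs[0], xs[1]]] + pairs(xs[2:])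
def pvPairs (xs : List String) : List (List String) :=
  if xs.length < 2 then []
  else [[xs.getD 0 "", xs.getD 1 ""]] ++ pvPairs (xs.drop 2)
termination_by xs.length
decreasing_by simp [List.length_drop]; omega

def expectedOutputsAnalysis_alt (table : List String) : List (List String) :=
  match PySem.List.index? table "Expected output names:" with
  | none => []   -- table.index raises ValueError here; excluded by Pre_
  | some idx => pvPairs (PySem.List.slice table (some ((idx : Int) + 2)) none)

-- ===== PRECONDITION & SPEC =====
-- table.index raises ValueError when the marker is absent; Pre_ excludes exactly those inputs.
def Pre_expectedOutputsAnalysis (table : List String) : Prop :=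
  "Expected output names:" ∈ table
instance (table : List String) : Decidable (Pre_expectedOutputsAnalysis table) := by
  unfold Pre_expectedOutputsAnalysis; infer_instance

def pvWitness_expectedOutputsAnalysis : List String :=
  ["Expected output names:", "n", "a", "b"]

def Spec_expectedOutputsAnalysis (table : List String) (out : List (List String)) : Prop := out = expectedOutputsAnalysis_alt table
instance (table : List String) (out : List (List String)) : Decidable (Spec_expectedOutputsAnalysis table out) := by unfold Spec_expectedOutputsAnalysis; infer_instance

-- ===== CLAIM (what is proved, stated in full; the proofs are below) =====
def Claim_equal_expectedOutputsAnalysis : Prop := ∀ (table : List String), Dom_expectedOutputsAnalysis table → Pre_expectedOutputsAnalysis table → Spec_expectedOutputsAnalysis table (expectedOutputsAnalysis table)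

-- ===== LEMMAS AND PROOFS =====

-- A's loop from index ind produces exactly the consecutive pairs of table.drop ind.
theorem pvALoop_eq_pairs (table : List String) (ind : Nat) (acc : List (List String)) :
    pvALoop table ind acc = acc ++ pvPairs (table.drop ind) := by
  fun_induction pvALoop table ind acc with
  | case1 ind acc h ih =>
    rw [ih]
    have hlen : ¬ (table.drop ind).length < 2 := by simp [List.length_drop]; omega
    conv_rhs => rw [pvPairs]
    rw [if_neg hlen]
    have h0 : (table.drop ind).getD 0 "" = table.getD ind "" := by
      simp [List.getD_eq_getElem?_getD, List.getElem?_drop]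
    have h1 : (table.drop ind).getD 1 "" = table.getD (ind + 1) "" := by
      simp [List.getD_eq_getElem?_getD, List.getElem?_drop]
    rw [List.drop_drop, h0, h1]
    simp
  | case2 ind acc h =>
    have hlen : (table.drop ind).length < 2 := by simp [List.length_drop]; omega
    conv_rhs => rw [pvPairs]
    rw [if_pos hlen]
    simp

theorem expectedOutputsAnalysis_spec : Claim_equal_expectedOutputsAnalysis := by
  intro table _ hpre
  unfold Spec_expectedOutputsAnalysis expectedOutputsAnalysis expectedOutputsAnalysis_alt
  have hmem : PySem.List.index? table "Expected output names:" ≠ none := by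
    intro h
    rw [PySem.List.index?_eq_none_iff] at h
    exact h hpre
  cases hidx : PySem.List.index? table "Expected output names:" with
  | none => exact absurd hidx hmem
  | some deb =>
    obtain ⟨hlt, -, -⟩ := PySem.List.getElem_of_index?_eq_some hidx
    have hslice2 : PySem.List.slice table (some ((deb : Int) + 2)) none = table.drop (deb + 2) := by
      have : ((deb : Int) + 2) = ((deb + 2 : Nat) : Int) := by push_cast; ring
      rw [this, PySem.List.slice_from_natCast]
    dsimp only
    rw [PySem.List.slice_from_natCast, hslice2]
    by_cases h2 : 2 ≤ (table.drop deb).length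
    · rw [if_pos h2, pvALoop_eq_pairs]
      simp
    · rw [if_neg h2]
      have : (table.drop (deb + 2)) = [] := by
        simp only [List.length_drop] at h2 ⊢
        apply List.drop_eq_nil_of_le; omega
      rw [this, pvPairs]
      simp

-- ===== VERDICT (by name: the statement is the Claim_ definition above) =====
-- (theorem expectedOutputsAnalysis_spec is stated above, directly after its lemma)
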